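-- pv_equiv track=rewrite | github.com/matta-kelly/stateball | packages/simulator/sim/game_inputs/game.py | _merge_lineup
-- ===== SOURCE A (Python) =====
-- def _merge_lineup(
--     batters_seen: list[int], starting_lineup: list[int]
-- ) -> list[int]:
--     """Build current 9-man lineup from observed batters + lineup card.
--
--     If fewer than 9 distinct batters have appeared, fill remaining slots
--     from the starting lineup card (players who haven't batted yet).
--     The order is: observed batters in batting order, then unfilled starters.
--     """
--     if len(batters_seen) >= 9:
--         # Take the last 9 distinct batters in the order they appeared
--         return batters_seen[-9:]
--
--     # Fill from lineup card — starters who haven't batted yet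
--     seen_set = set(batters_seen)
--     remaining = [pid for pid in starting_lineup if pid not in seen_set]
--
--     # Rebuild in lineup card order, substituting observed batters
--     # into their predecessors' slots
--     lineup = []
--     remaining_idx = 0
--     for pid in starting_lineup:
--         if pid in seen_set:
--             lineup.append(pid)
--         elif remaining_idx < len(remaining):
--             lineup.append(remaining[remaining_idx])
--             remaining_idx += 1
--
--     return lineup[:9]
-- ===== SOURCE B (Python) =====
-- def _merge_lineup(
--     batters_seen: list[int], starting_lineup: list[int]
-- ) -> list[int]:
--     # When >= 9 batters were observed, the lineup is the last 9 of them.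
--     # Otherwise A's reconstruction loop provably reproduces the lineup
--     # card unchanged, so the answer is just the first 9 starters.
--     if len(batters_seen) >= 9:
--         return batters_seen[-9:]
--     return starting_lineup[:9]
-- ===== Notes on version B (the rewrite author's own statement) =====
-- stated objective: simpler
-- what changed: Replaced the set-building, 'remaining' filtering and slot-reconstruction loop by a two-line closed form: the loop always rebuilds starting_lineup unchanged (each unseen pid it walks equals the next remaining element), so the under-9 branch is exactly starting_lineup[:9].
import Mathlib
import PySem

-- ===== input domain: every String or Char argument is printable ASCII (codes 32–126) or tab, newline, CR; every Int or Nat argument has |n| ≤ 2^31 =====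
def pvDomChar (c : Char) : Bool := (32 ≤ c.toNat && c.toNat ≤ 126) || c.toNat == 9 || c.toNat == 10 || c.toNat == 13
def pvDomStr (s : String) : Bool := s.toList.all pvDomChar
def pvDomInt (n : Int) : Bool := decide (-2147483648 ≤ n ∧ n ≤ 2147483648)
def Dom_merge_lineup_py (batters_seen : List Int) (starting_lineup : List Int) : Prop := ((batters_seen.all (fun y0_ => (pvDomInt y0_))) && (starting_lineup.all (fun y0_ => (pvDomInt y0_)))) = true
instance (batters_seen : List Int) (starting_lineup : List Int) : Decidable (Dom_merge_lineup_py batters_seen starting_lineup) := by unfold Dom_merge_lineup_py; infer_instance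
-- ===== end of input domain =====

-- B replaces A's set + 'remaining' filter + reconstruction loop by a two-line closed
-- form (the loop always rebuilds starting_lineup unchanged), for simplicity.

-- ===== PORT A =====
-- the 'for pid in starting_lineup' loop, carrying (lineup, remaining_idx)
def mergeLoopA (seen : PySem.Set Int) (remaining : List Int) :
    List Int → List Int → Nat → List Int
  | [], lineup, _ => lineup
  | pid :: rest, lineup, idx =>
    if PySem.Set.contains seen pid then
      mergeLoopA seen remaining rest (lineup ++ [pid]) idx
    else if idx < remaining.length then
      mergeLoopA seen remaining rest (lineup ++ [remaining.getD idx 0]) (idx + 1)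
    else
      mergeLoopA seen remaining rest lineup idx

def merge_lineup_py (batters_seen : List Int) (starting_lineup : List Int) : List Int :=
  if 9 ≤ batters_seen.length then
    PySem.List.slice batters_seen (some (-9)) none
  else
    let seen_set : PySem.Set Int := PySem.Set.ofList batters_seen
    let remaining := starting_lineup.filter (fun pid => ! PySem.Set.contains seen_set pid)
    let lineup := mergeLoopA seen_set remaining starting_lineup [] 0
    PySem.List.slice lineup none (some 9)

-- ===== PORT B =====
def merge_lineup_py_alt (batters_seen : List Int) (starting_lineup : List Int) : List Int :=
  if 9 ≤ batters_seen.length then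
    PySem.List.slice batters_seen (some (-9)) none
  else
    PySem.List.slice starting_lineup none (some 9)

-- ===== PRECONDITION & SPEC =====
def Spec_merge_lineup_py (batters_seen : List Int) (starting_lineup : List Int) (out : List Int) : Prop := out = merge_lineup_py_alt batters_seen starting_lineup
instance (batters_seen : List Int) (starting_lineup : List Int) (out : List Int) : Decidable (Spec_merge_lineup_py batters_seen starting_lineup out) := by unfold Spec_merge_lineup_py; infer_instance

-- ===== CLAIM (what is proved, stated in full; the proofs are below) =====
def Claim_equal_merge_lineup_py : Prop := ∀ (batters_seen : List Int) (starting_lineup : List Int), Dom_merge_lineup_py batters_seen starting_lineup → Spec_merge_lineup_py batters_seen starting_lineup (merge_lineup_py batters_seen starting_lineup)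

-- ===== LEMMAS AND PROOFS =====
-- Invariant of A's loop: if remaining.drop idx holds exactly the not-yet-consumed
-- unseen pids of the suffix l still to be walked, the loop appends l verbatim.
theorem mergeLoopA_eq (seen : PySem.Set Int) (remaining : List Int) :
    ∀ (l acc : List Int) (idx : Nat),
      remaining.drop idx = l.filter (fun pid => ! PySem.Set.contains seen pid) →
      mergeLoopA seen remaining l acc idx = acc ++ l := by
  intro l
  induction l with
  | nil => intro acc idx _; simp [mergeLoopA]
  | cons pid rest ih =>
    intro acc idx h
    by_cases hs : PySem.Set.contains seen pid
    · have hf : (pid :: rest).filter (fun p => ! PySem.Set.contains seen p)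
          = rest.filter (fun p => ! PySem.Set.contains seen p) := by
        have hs' : (!decide (pid ∈ seen)) = false := by
          simpa [PySem.Set.contains] using hs
        simp [List.filter, hs']
      rw [mergeLoopA, if_pos hs, ih (acc ++ [pid]) idx (by rw [h, hf])]
      simp
    · have hf : (pid :: rest).filter (fun p => ! PySem.Set.contains seen p)
          = pid :: rest.filter (fun p => ! PySem.Set.contains seen p) := by
        have hs' : (!decide (pid ∈ seen)) = true := by
          simpa [PySem.Set.contains] using hs
        simp [List.filter, hs']
      rw [hf] at h
      have hlt : idx < remaining.length := by
        by_contra hge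
        have : remaining.drop idx = [] := List.drop_eq_nil_of_le (by omega)
        rw [this] at h; exact List.cons_ne_nil _ _ h.symm
      have hget : remaining.getD idx 0 = pid := by
        have h0 : remaining[idx]? = some pid := by
          have := @List.getElem?_drop _ remaining idx 0
          rw [h] at this; simpa using this.symm
        simp [List.getD, h0]
      have hdrop : remaining.drop (idx + 1)
          = rest.filter (fun p => ! PySem.Set.contains seen p) := by
        have : remaining.drop (idx + 1) = (remaining.drop idx).tail := by
          rw [List.tail_drop]
        rw [this, h]; rfl
      rw [mergeLoopA, if_neg hs, if_pos hlt, hget,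
        ih (acc ++ [pid]) (idx + 1) hdrop]
      simp

-- ===== VERDICT (by name: the statement is the Claim_ definition above) =====
theorem merge_lineup_py_spec : Claim_equal_merge_lineup_py := by
  intro bs sl _
  unfold Spec_merge_lineup_py merge_lineup_py merge_lineup_py_alt
  by_cases h : 9 ≤ bs.length
  · simp [h]
  · simp only [if_neg h]
    rw [mergeLoopA_eq _ _ sl [] 0 (by simp)]
    simp
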